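-- pv_equiv track=rewrite | github.com/Zarzwick/Brochets | src/identification/lbphistogram.py | uniform_pattern
-- ===== SOURCE A (Python) =====
-- def uniform_pattern(pattern: int, P: int, n: int = 2) -> bool:
--
--     patternStr = format(pattern, '0'+str(P)+'b')
--     patternLen = len(patternStr)
--     nbTransitions = 0
--
--     for i in range(patternLen):
--         j = (i+1) % patternLen
--         if patternStr[i] != patternStr[j]:
--             nbTransitions += 1
--
--     return nbTransitions <= n
-- ===== SOURCE B (Python) =====
-- def uniform_pattern(pattern: int, P: int, n: int = 2) -> bool:
--     # Circular bit-transition count by pure integer arithmetic: XOR the pattern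
--     # with its one-step circular rotation over its L-bit field and popcount it.
--     L = max(P, pattern.bit_length(), 1)
--     rotated = ((pattern << 1) | (pattern >> (L - 1))) & ((1 << L) - 1)
--     return bin(pattern ^ rotated).count('1') <= n
-- ===== Notes on version B (the rewrite author's own statement) =====
-- stated objective: faster
-- what changed: A builds the zero-padded binary string and scans it with an index loop comparing adjacent characters modulo the length; B never builds a string: it counts circular transitions as the popcount of pattern XOR its one-step circular rotation, using only integer bit operations. Pre_ excludes P < 0, where A's format specifier is invalid and A raises ValueError, and negative patterns, which are outside the natural domain of LBP bit patterns and where A's string scan counts the '-' sign of format()'s output as a digit.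
-- outside the precondition, e.g. on uniform_pattern(-17, 6, 2): A returns False, B returns True; on uniform_pattern(5, -3, 2): A raises ValueError, B returns True
import Mathlib
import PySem

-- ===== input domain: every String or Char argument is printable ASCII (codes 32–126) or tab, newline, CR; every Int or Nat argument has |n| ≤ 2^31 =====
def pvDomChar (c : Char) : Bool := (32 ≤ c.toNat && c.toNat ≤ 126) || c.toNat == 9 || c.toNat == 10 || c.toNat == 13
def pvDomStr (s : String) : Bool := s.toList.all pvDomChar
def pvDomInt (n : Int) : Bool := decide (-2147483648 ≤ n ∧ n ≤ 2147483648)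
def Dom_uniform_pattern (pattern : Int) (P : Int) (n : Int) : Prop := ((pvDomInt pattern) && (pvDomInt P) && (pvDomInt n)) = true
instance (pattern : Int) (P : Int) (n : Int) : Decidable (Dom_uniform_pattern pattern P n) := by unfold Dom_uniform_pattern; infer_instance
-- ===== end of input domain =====

-- B replaces A's zero-padded binary string and its character-scanning loop by pure
-- integer bit arithmetic (XOR with a one-step circular rotation, popcount); same result
-- on the natural domain of nonnegative bit patterns.

-- ===== PORT A =====
-- helpers for Python's format(pattern, '0'+str(P)+'b'); fuel-based structural
-- recursion (fuel = the number itself) so terms reduce in the kernel.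
def pvDigitsAux : Nat → Nat → List Char
  | 0, _ => []
  | fuel+1, m => if m = 0 then [] else pvDigitsAux fuel (m / 2) ++ [if m % 2 = 1 then '1' else '0']

-- binary digits of m, MSB first ([] for 0)
def pvNatDigits (m : Nat) : List Char := pvDigitsAux m m

-- Python bin-digits of m (format(m, 'b')): '0' for 0
def pvBinDigits (m : Nat) : List Char := if m = 0 then ['0'] else pvNatDigits m

-- format(pattern, '0'+str(P)+'b') for P ≥ 0: zero-pad to total width P, sign first
def pvFormatBin (pattern : Int) (P : Int) : List Char :=
  if pattern < 0 then
    let d := pvBinDigits pattern.natAbs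
    '-' :: (List.replicate (P - 1 - (d.length : Int)).toNat '0' ++ d)
  else
    let d := pvBinDigits pattern.toNat
    List.replicate (P - (d.length : Int)).toNat '0' ++ d

def uniform_pattern (pattern : Int) (P : Int) (n : Int) : Bool :=
  -- Python strings are O(1)-indexed; the scanned string is held as an Array Char
  let patternStr := (pvFormatBin pattern P).toArray
  let patternLen := patternStr.size
  let nbTransitions : Int :=
    (List.range patternLen).foldl
      (fun acc i =>
        if patternStr.getD i ' ' ≠ patternStr.getD ((i + 1) % patternLen) ' ' then acc + 1 else acc)
      0
  decide (nbTransitions ≤ n)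

-- ===== PORT B =====
-- Python's int bitwise ops and bit_length/bit_count via PySem (exact on negatives too)
def uniform_pattern_alt (pattern : Int) (P : Int) (n : Int) : Bool :=
  let L : Int := max (max P (PySem.Int.bitLength pattern : Int)) 1
  let rotated := PySem.Int.band (PySem.Int.bor (pattern <<< (1 : Nat)) (pattern >>> (L.toNat - 1)))
    (((1 : Int) <<< L.toNat) - 1)
  decide ((PySem.Int.bitCount (PySem.Int.bxor pattern rotated) : Int) ≤ n)

-- ===== PRECONDITION & SPEC =====
-- A raises ValueError when P < 0 (the format specifier '0'+str(P)+'b' is invalid then).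
-- Negative patterns are excluded as outside the natural domain of LBP bit patterns:
-- there A's string scan counts the '-' sign of format()'s output as a digit, an
-- artefact of the string representation, while B treats the pattern as a bit field.
def Pre_uniform_pattern (pattern : Int) (P : Int) (n : Int) : Prop := 0 ≤ pattern ∧ 0 ≤ P
instance (pattern : Int) (P : Int) (n : Int) : Decidable (Pre_uniform_pattern pattern P n) := by
  unfold Pre_uniform_pattern; infer_instance

def pvWitness_uniform_pattern : Int × Int × Int := (5, 8, 2)

def Spec_uniform_pattern (pattern : Int) (P : Int) (n : Int) (out : Bool) : Prop :=
  out = uniform_pattern_alt pattern P n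
instance (pattern : Int) (P : Int) (n : Int) (out : Bool) : Decidable (Spec_uniform_pattern pattern P n out) := by
  unfold Spec_uniform_pattern; infer_instance

-- ===== CLAIM (what is proved, stated in full; the proofs are below) =====
def Claim_equal_uniform_pattern : Prop := ∀ (pattern : Int) (P : Int) (n : Int), Dom_uniform_pattern pattern P n → Pre_uniform_pattern pattern P n → Spec_uniform_pattern pattern P n (uniform_pattern pattern P n)


-- ===== LEMMAS AND PROOFS =====

-- Nat-level reference versions of bit_length / popcount (fuel-based so terms reduce)
def pvBitLenAux : Nat → Nat → Nat
  | 0, _ => 0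
  | fuel+1, m => if m = 0 then 0 else pvBitLenAux fuel (m / 2) + 1

def pvBitLen (m : Nat) : Nat := pvBitLenAux m m

def pvPopAux : Nat → Nat → Nat
  | 0, _ => 0
  | fuel+1, m => if m = 0 then 0 else m % 2 + pvPopAux fuel (m / 2)

def pvPopcount (m : Nat) : Nat := pvPopAux m m

def bitChar (b : Bool) : Char := if b then '1' else '0'

-- the L bits of p, MSB first
def pvBits (p L : Nat) : List Bool := (List.range L).map (fun i => p.testBit (L - 1 - i))

-- fuel congruence for the three fuel-based helpers
theorem pvDigitsAux_congr : ∀ f1 f2 m : Nat, m ≤ f1 → m ≤ f2 → pvDigitsAux f1 m = pvDigitsAux f2 m := by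
  intro f1
  induction f1 with
  | zero =>
    intro f2 m h1 _
    have : m = 0 := by omega
    subst this
    cases f2 <;> simp [pvDigitsAux]
  | succ f ih =>
    intro f2 m h1 h2
    by_cases hm : m = 0
    · subst hm; cases f2 <;> simp [pvDigitsAux]
    · obtain ⟨g, rfl⟩ : ∃ g, f2 = g + 1 := ⟨f2 - 1, by omega⟩
      simp only [pvDigitsAux, if_neg hm]
      rw [ih g (m / 2) (by omega) (by omega)]

theorem pvBitLenAux_congr : ∀ f1 f2 m : Nat, m ≤ f1 → m ≤ f2 → pvBitLenAux f1 m = pvBitLenAux f2 m := by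
  intro f1
  induction f1 with
  | zero =>
    intro f2 m h1 _
    have : m = 0 := by omega
    subst this
    cases f2 <;> simp [pvBitLenAux]
  | succ f ih =>
    intro f2 m h1 h2
    by_cases hm : m = 0
    · subst hm; cases f2 <;> simp [pvBitLenAux]
    · obtain ⟨g, rfl⟩ : ∃ g, f2 = g + 1 := ⟨f2 - 1, by omega⟩
      simp only [pvBitLenAux, if_neg hm]
      rw [ih g (m / 2) (by omega) (by omega)]

theorem pvPopAux_congr : ∀ f1 f2 m : Nat, m ≤ f1 → m ≤ f2 → pvPopAux f1 m = pvPopAux f2 m := by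
  intro f1
  induction f1 with
  | zero =>
    intro f2 m h1 _
    have : m = 0 := by omega
    subst this
    cases f2 <;> simp [pvPopAux]
  | succ f ih =>
    intro f2 m h1 h2
    by_cases hm : m = 0
    · subst hm; cases f2 <;> simp [pvPopAux]
    · obtain ⟨g, rfl⟩ : ∃ g, f2 = g + 1 := ⟨f2 - 1, by omega⟩
      simp only [pvPopAux, if_neg hm]
      rw [ih g (m / 2) (by omega) (by omega)]

theorem pvNatDigits_zero : pvNatDigits 0 = [] := rfl

theorem pvNatDigits_rec (m : Nat) (h : m ≠ 0) :
    pvNatDigits m = pvNatDigits (m / 2) ++ [if m % 2 = 1 then '1' else '0'] := by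
  unfold pvNatDigits
  obtain ⟨k, rfl⟩ : ∃ k, m = k + 1 := ⟨m - 1, by omega⟩
  simp only [pvDigitsAux, if_neg h]
  rw [pvDigitsAux_congr k ((k + 1) / 2) ((k + 1) / 2) (by omega) (by omega)]

theorem pvBitLen_zero : pvBitLen 0 = 0 := rfl

theorem pvBitLen_rec (m : Nat) (h : m ≠ 0) : pvBitLen m = pvBitLen (m / 2) + 1 := by
  unfold pvBitLen
  obtain ⟨k, rfl⟩ : ∃ k, m = k + 1 := ⟨m - 1, by omega⟩
  simp only [pvBitLenAux, if_neg h]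
  rw [pvBitLenAux_congr k ((k + 1) / 2) ((k + 1) / 2) (by omega) (by omega)]

theorem pvPopcount_zero : pvPopcount 0 = 0 := rfl

theorem pvPopcount_rec (m : Nat) (h : m ≠ 0) : pvPopcount m = m % 2 + pvPopcount (m / 2) := by
  unfold pvPopcount
  obtain ⟨k, rfl⟩ : ∃ k, m = k + 1 := ⟨m - 1, by omega⟩
  simp only [pvPopAux, if_neg h]
  rw [pvPopAux_congr k ((k + 1) / 2) ((k + 1) / 2) (by omega) (by omega)]

-- bit-length facts
theorem pvBitLen_lt_pow : ∀ m : Nat, m < 2 ^ pvBitLen m := by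
  intro m
  induction m using Nat.strong_induction_on with
  | _ m ih =>
    by_cases h : m = 0
    · subst h; simp [pvBitLen_zero]
    · rw [pvBitLen_rec m h, pow_succ]
      have := ih (m / 2) (Nat.div_lt_self (Nat.pos_of_ne_zero h) (by norm_num))
      omega

theorem pvBitLen_pos (m : Nat) (h : m ≠ 0) : 1 ≤ pvBitLen m := by
  rw [pvBitLen_rec m h]; omega

theorem testBit_of_pvBitLen_le (m k : Nat) (h : pvBitLen m ≤ k) : m.testBit k = false :=
  Nat.testBit_lt_two_pow (lt_of_lt_of_le (pvBitLen_lt_pow m) (Nat.pow_le_pow_right (by norm_num) h))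

theorem pvNatDigits_length : ∀ m : Nat, (pvNatDigits m).length = pvBitLen m := by
  intro m
  induction m using Nat.strong_induction_on with
  | _ m ih =>
    by_cases h : m = 0
    · subst h; simp [pvNatDigits_zero, pvBitLen_zero]
    · rw [pvNatDigits_rec m h, pvBitLen_rec m h]
      simp [ih (m / 2) (Nat.div_lt_self (Nat.pos_of_ne_zero h) (by norm_num))]

theorem pvBinDigits_length (m : Nat) : (pvBinDigits m).length = max 1 (pvBitLen m) := by
  by_cases h : m = 0
  · subst h; simp [pvBinDigits, pvBitLen_zero]
  · have := pvBitLen_pos m h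
    simp [pvBinDigits, if_neg h, pvNatDigits_length]
    omega

-- pvBits structure
theorem pvBits_length (p L : Nat) : (pvBits p L).length = L := by simp [pvBits]

theorem pvBits_succ (p L : Nat) : pvBits p (L + 1) = p.testBit L :: pvBits p L := by
  unfold pvBits
  rw [List.range_succ_eq_map, List.map_cons, List.map_map]
  congr 1
  apply List.map_congr_left
  intro i _
  simp only [Function.comp_apply]
  congr 1
  omega

theorem pvBits_snoc (p L : Nat) : pvBits p (L + 1) = pvBits (p / 2) L ++ [p.testBit 0] := by
  unfold pvBits
  rw [List.range_succ, List.map_append]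
  congr 1
  · apply List.map_congr_left
    intro i hi
    rw [List.mem_range] at hi
    show p.testBit (L + 1 - 1 - i) = (p / 2).testBit (L - 1 - i)
    rw [show L + 1 - 1 - i = (L - 1 - i) + 1 from by omega, Nat.testBit_add_one]
  · simp

theorem digits_exact : ∀ p : Nat, p ≠ 0 → pvNatDigits p = (pvBits p (pvBitLen p)).map bitChar := by
  intro p
  induction p using Nat.strong_induction_on with
  | _ p ih =>
    intro h
    rw [pvNatDigits_rec p h, pvBitLen_rec p h, pvBits_snoc, List.map_append]
    congr 1
    · by_cases h2 : p / 2 = 0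
      · rw [h2, pvNatDigits_zero, pvBitLen_zero]; simp [pvBits]
      · exact ih (p / 2) (Nat.div_lt_self (Nat.pos_of_ne_zero h) (by norm_num)) h2
    · simp only [List.map_cons, List.map_nil, bitChar, Nat.testBit_zero]
      by_cases hp : p % 2 = 1 <;> simp [hp]

theorem padded_digits (p : Nat) : ∀ L : Nat, pvBitLen p ≤ L → 1 ≤ L →
    List.replicate (L - (pvBinDigits p).length) '0' ++ pvBinDigits p = (pvBits p L).map bitChar := by
  intro L
  induction L with
  | zero => intro _ h2; omega
  | succ L ih =>
    intro h1 _
    by_cases hL : L = 0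
    · subst hL
      have hp2 : p < 2 := lt_of_lt_of_le (pvBitLen_lt_pow p)
        (Nat.pow_le_pow_right (by norm_num) h1)
      interval_cases p <;> decide
    · have hL1 : 1 ≤ L := by omega
      by_cases hb : pvBitLen p ≤ L
      · have hlen : (pvBinDigits p).length ≤ L := by rw [pvBinDigits_length]; omega
        rw [pvBits_succ, List.map_cons, testBit_of_pvBitLen_le p L hb,
          show L + 1 - (pvBinDigits p).length = (L - (pvBinDigits p).length) + 1 from by omega,
          List.replicate_succ, List.cons_append, ih hb hL1]
        rfl
      · have hbl : pvBitLen p = L + 1 := by omega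
        have hp0 : p ≠ 0 := by
          intro h0; subst h0; rw [pvBitLen_zero] at hbl; omega
        have hd : pvBinDigits p = pvNatDigits p := by simp [pvBinDigits, hp0]
        have hlen : (pvBinDigits p).length = L + 1 := by
          rw [pvBinDigits_length, hbl]; omega
        rw [hlen, Nat.sub_self, List.replicate_zero, List.nil_append, hd, digits_exact p hp0, hbl]

-- countP machinery
theorem countP_range_rev (L : Nat) (c : Nat → Bool) :
    (List.range L).countP c = (List.range L).countP (fun i => c (L - 1 - i)) := by
  conv_lhs => rw [← List.countP_reverse]
  rw [List.range_eq_range', List.reverse_range', List.countP_map, ← List.range_eq_range']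
  apply List.countP_congr
  intro x _
  simp only [Function.comp_apply, Nat.zero_add]

theorem popcount_countP : ∀ (L x : Nat), x < 2 ^ L → pvPopcount x = (List.range L).countP x.testBit := by
  intro L
  induction L with
  | zero =>
    intro x h
    have : x = 0 := by simpa using h
    subst this; simp [pvPopcount_zero]
  | succ L ih =>
    intro x h
    by_cases hx : x = 0
    · subst hx
      rw [pvPopcount_zero]
      symm
      rw [List.countP_eq_zero]
      intro a _
      simp [Nat.zero_testBit]
    · rw [pvPopcount_rec x hx, List.range_succ_eq_map, List.countP_cons, List.countP_map]
      have h2 : x / 2 < 2 ^ L := by rw [pow_succ] at h; omega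
      have hcomp : (List.range L).countP (x.testBit ∘ Nat.succ) = (List.range L).countP (x / 2).testBit := by
        apply List.countP_congr
        intro i _
        simp [Nat.testBit_succ]
      rw [hcomp, ← ih _ h2, Nat.testBit_zero]
      by_cases hm : x % 2 = 1 <;> simp [hm] <;> omega

-- the circular-transition count of the L-bit string of p equals B's rotation popcount
theorem circ_eq_pop (p L : Nat) (hL : 1 ≤ L) (hp : pvBitLen p ≤ L) :
    (List.range L).countP (fun i =>
        decide (bitChar (p.testBit (L - 1 - i)) ≠ bitChar (p.testBit (L - 1 - ((i + 1) % L)))))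
    = pvPopcount (p ^^^ (((p <<< 1) ||| (p >>> (L - 1))) &&& ((1 <<< L) - 1))) := by
  have hplt : p < 2 ^ L := lt_of_lt_of_le (pvBitLen_lt_pow p) (Nat.pow_le_pow_right (by norm_num) hp)
  set rot := ((p <<< 1) ||| (p >>> (L - 1))) &&& ((1 <<< L) - 1) with hrot
  have hpow : 0 < 2 ^ L := Nat.two_pow_pos L
  have hrotlt : rot < 2 ^ L := by
    have h1 : rot ≤ (1 <<< L) - 1 := Nat.and_le_right
    rw [Nat.one_shiftLeft] at h1
    omega
  rw [popcount_countP L _ (Nat.xor_lt_two_pow hplt hrotlt), countP_range_rev]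
  apply List.countP_congr
  intro j hj
  rw [List.mem_range] at hj
  have e1 : L - 1 - (L - 1 - j) = j := by omega
  have hxor : (p ^^^ rot).testBit j = (p.testBit j ^^ rot.testBit j) := Nat.testBit_xor p rot j
  have hrotbit : rot.testBit j = (if j = 0 then p.testBit (L - 1) else p.testBit (j - 1)) := by
    rw [hrot, Nat.testBit_land, Nat.testBit_lor, Nat.testBit_shiftLeft, Nat.testBit_shiftRight,
      Nat.one_shiftLeft, Nat.testBit_two_pow_sub_one]
    by_cases hj0 : j = 0
    · subst hj0
      have h0L : 0 < L := hL
      simp [h0L]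
    · have hhi : p.testBit (L - 1 + j) = false :=
        Nat.testBit_lt_two_pow (lt_of_lt_of_le hplt (Nat.pow_le_pow_right (by norm_num) (by omega)))
      have h1j : 1 ≤ j := by omega
      simp [hj0, h1j, hhi, hj]
  have hmod : (L - 1 - j + 1) % L = if j = 0 then 0 else L - j := by
    by_cases hj0 : j = 0
    · subst hj0
      rw [if_pos rfl, show L - 1 - 0 + 1 = L from by omega, Nat.mod_self]
    · rw [if_neg hj0, show L - 1 - j + 1 = L - j from by omega]
      exact Nat.mod_eq_of_lt (by omega)
  rw [e1, hmod, hxor, hrotbit]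
  by_cases hj0 : j = 0
  · subst hj0
    simp only [if_pos rfl, Nat.sub_zero]
    cases hA : p.testBit 0 <;> cases hB : p.testBit (L - 1) <;> simp [bitChar, hA, hB]
  · rw [if_neg hj0, if_neg hj0, show L - 1 - (L - j) = j - 1 from by omega]
    cases hA : p.testBit j <;> cases hB : p.testBit (j - 1) <;> simp [bitChar, hA, hB]

-- char-level helper facts
theorem toArray_getD (l : List Char) (i : Nat) (d : Char) : l.toArray.getD i d = l.getD i d := by
  simp [Array.getD, List.getD_eq_getElem?_getD]
  split
  · next h => rw [List.getElem?_eq_getElem h]; rfl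
  · next h => rw [List.getElem?_eq_none (by omega)]; rfl

theorem portA_count (pattern P n : Int) :
    uniform_pattern pattern P n =
      decide ((((List.range (pvFormatBin pattern P).length).countP (fun i =>
        decide ((pvFormatBin pattern P).getD i ' ' ≠
          (pvFormatBin pattern P).getD ((i + 1) % (pvFormatBin pattern P).length) ' ')) : Int)) ≤ n) := by
  unfold uniform_pattern
  dsimp only
  rw [PySem.List.foldl_ite_add_one, List.size_toArray]
  have hp : (fun i => decide ((pvFormatBin pattern P).toArray.getD i ' ' ≠
        (pvFormatBin pattern P).toArray.getD ((i + 1) % (pvFormatBin pattern P).length) ' '))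
      = (fun i => decide ((pvFormatBin pattern P).getD i ' ' ≠
        (pvFormatBin pattern P).getD ((i + 1) % (pvFormatBin pattern P).length) ' ')) := by
    funext i
    rw [toArray_getD, toArray_getD]
  rw [hp]
  norm_num

theorem map_bitChar_bits (p L : Nat) :
    (pvBits p L).map bitChar = (List.range L).map (fun i => bitChar (p.testBit (L - 1 - i))) := by
  unfold pvBits
  rw [List.map_map]
  rfl

theorem getD_bits (p L k : Nat) (hk : k < L) :
    ((pvBits p L).map bitChar).getD k ' ' = bitChar (p.testBit (L - 1 - k)) := by
  rw [map_bitChar_bits]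
  exact PySem.List.getD_map_range _ L k ' ' hk

theorem pos_count (p L : Nat) (hL : 1 ≤ L) (hp : pvBitLen p ≤ L) :
    (List.range L).countP (fun i =>
        decide (((pvBits p L).map bitChar).getD i ' ' ≠
          ((pvBits p L).map bitChar).getD ((i + 1) % L) ' '))
    = pvPopcount (p ^^^ (((p <<< 1) ||| (p >>> (L - 1))) &&& ((1 <<< L) - 1))) := by
  rw [← circ_eq_pop p L hL hp]
  apply List.countP_congr
  intro i hi
  rw [List.mem_range] at hi
  rw [getD_bits p L i hi, getD_bits p L ((i + 1) % L) (Nat.mod_lt _ (by omega))]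

-- PySem bit_length / bit_count agree with the fuel-based helpers on Nat
theorem bitLength_eq_pvBitLen : ∀ p : Nat, PySem.Int.bitLength (p : Int) = pvBitLen p := by
  intro p
  induction p using Nat.strong_induction_on with
  | _ p ih =>
    by_cases h : p = 0
    · subst h; simp [PySem.Int.bitLength_zero, pvBitLen_zero]
    · rw [PySem.Int.bitLength_natCast (Nat.pos_of_ne_zero h), pvBitLen_rec p h,
        ih (p / 2) (Nat.div_lt_self (Nat.pos_of_ne_zero h) (by norm_num))]

theorem bitCount_eq_pvPopcount : ∀ p : Nat, PySem.Int.bitCount (p : Int) = pvPopcount p := by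
  intro p
  induction p using Nat.strong_induction_on with
  | _ p ih =>
    by_cases h : p = 0
    · subst h; simp [PySem.Int.bitCount_zero, pvPopcount_zero]
    · rw [PySem.Int.bitCount_natCast (Nat.pos_of_ne_zero h), pvPopcount_rec p h,
        ih (p / 2) (Nat.div_lt_self (Nat.pos_of_ne_zero h) (by norm_num))]

-- the alt port, on a nonnegative pattern, computes the Nat rotation-popcount formula
theorem alt_on_nonneg (p : Nat) (P n : Int) (hP : 0 ≤ P) :
    uniform_pattern_alt (p : Int) P n =
      decide ((pvPopcount (p ^^^ (((p <<< 1) ||| (p >>> (max (max P.toNat (pvBitLen p)) 1 - 1)))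
        &&& ((1 <<< max (max P.toNat (pvBitLen p)) 1) - 1))) : Int) ≤ n) := by
  unfold uniform_pattern_alt
  dsimp only
  rw [bitLength_eq_pvBitLen]
  set Lnat : Nat := max (max P.toNat (pvBitLen p)) 1 with hLnat
  have hL : max (max P ((pvBitLen p : Nat) : Int)) 1 = (Lnat : Int) := by
    rw [hLnat]
    push_cast
    omega
  rw [hL, Int.toNat_natCast]
  have hshl : ((p : Int) <<< (1 : Nat)) = ((p <<< 1 : Nat) : Int) := by simp
  have hshr : ((p : Int) >>> (Lnat - 1)) = ((p >>> (Lnat - 1) : Nat) : Int) := by simp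
  have hone : ((1 : Int) <<< Lnat) - (1 : Int) = (((1 <<< Lnat) - 1 : Nat) : Int) := by
    have h1 : ((1 : Int) <<< Lnat) = ((1 <<< Lnat : Nat) : Int) := by
      simpa using (Int.natCast_shiftLeft 1 Lnat).symm
    rw [h1]
    have : 1 ≤ (1 <<< Lnat : Nat) := by
      rw [Nat.one_shiftLeft]
      exact Nat.one_le_two_pow
    push_cast [this]
    ring
  rw [hshl, hshr, PySem.Int.bor_natCast, hone, PySem.Int.band_natCast, PySem.Int.bxor_natCast,
    bitCount_eq_pvPopcount]

-- ===== VERDICT (by name: the statement is the Claim_ definition above) =====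
theorem uniform_pattern_spec : Claim_equal_uniform_pattern := by
  intro pattern P n _ hPre
  obtain ⟨hp0, hP0⟩ := hPre
  have hneg : ¬ pattern < 0 := by omega
  unfold Spec_uniform_pattern
  rw [portA_count]
  have hpat : pattern = ((pattern.toNat : Nat) : Int) := by omega
  rw [hpat, alt_on_nonneg pattern.toNat P n hP0]
  set p := pattern.toNat with hpdef
  have hdlen : (pvBinDigits p).length = max 1 (pvBitLen p) := pvBinDigits_length p
  set L : Nat := (P - ((pvBinDigits p).length : Int)).toNat + (pvBinDigits p).length with hLdef
  have hP0' : (0 : Int) ≤ P := hP0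
  have hL1 : 1 ≤ L := by omega
  have hbl : pvBitLen p ≤ L := by omega
  have hsA : pvFormatBin ((p : Nat) : Int) P = (pvBits p L).map bitChar := by
    unfold pvFormatBin
    rw [if_neg (by omega : ¬ ((p : Nat) : Int) < 0)]
    dsimp only
    rw [show (((p : Nat) : Int)).toNat = p from by omega]
    rw [show (P - ((pvBinDigits p).length : Int)).toNat
        = L - (pvBinDigits p).length from by omega]
    exact padded_digits p L hbl hL1
  rw [hsA]
  have hlen : ((pvBits p L).map bitChar).length = L := by simp [pvBits_length]
  rw [hlen, pos_count p L hL1 hbl]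
  have hLalt : max (max P.toNat (pvBitLen p)) 1 = L := by
    have h1 : max (max P.toNat (pvBitLen p)) 1 = max P.toNat (max 1 (pvBitLen p)) := by
      rw [max_assoc, max_comm (pvBitLen p) 1]
    rw [h1, ← hdlen]
    rcases le_total P ((pvBinDigits p).length : Int) with h | h
    · rw [max_eq_right (by omega)]
      omega
    · rw [max_eq_left (by omega)]
      omega
  rw [hLalt]
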